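-- pv_equiv track=rewrite | github.com/Jacob-Barhak/FairTournament | Fair.py | PlayedWithPlayerCount
-- ===== SOURCE A (Python) =====
-- def PlayedWithPlayerCount(Player, TeamSizes, PreviousPlaysForPlayer, PlayerArrangementForRound):
--     "Returns a vector of number of plays with player"
--     # first locate the players team
--     TeamStart = 0
--     Team = None
--     ReturnPlaysPerPlayer = PreviousPlaysForPlayer[:]
--     for TeamSize in TeamSizes:
--         Team = PlayerArrangementForRound[TeamStart:(TeamStart + abs(TeamSize))]
--         if Player in Team:
--             for TeamPlayer in Team:
--                 ReturnPlaysPerPlayer[TeamPlayer] = ReturnPlaysPerPlayer[TeamPlayer] + 1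
--             break
--         TeamStart = TeamStart + abs(TeamSize)
--     assert Team != None
--     return ReturnPlaysPerPlayer
-- ===== SOURCE B (Python) =====
-- from itertools import accumulate
-- import bisect
--
-- def PlayedWithPlayerCount(Player, TeamSizes, PreviousPlaysForPlayer, PlayerArrangementForRound):
--     "Returns a vector of number of plays with player"
--     counts = PreviousPlaysForPlayer[:]
--     bounds = list(accumulate(abs(s) for s in TeamSizes))
--     assert bounds
--     if Player not in PlayerArrangementForRound:
--         return counts
--     p = PlayerArrangementForRound.index(Player)
--     if p >= bounds[-1]:
--         return counts
--     i = bisect.bisect_right(bounds, p)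
--     lo = bounds[i - 1] if i > 0 else 0
--     for Teammate in PlayerArrangementForRound[lo:bounds[i]]:
--         counts[Teammate] = counts[Teammate] + 1
--     return counts
-- ===== Notes on version B (the rewrite author's own statement) =====
-- stated objective: alternative
-- what changed: A scans the teams one by one, slicing each team block and testing Player's membership in it; B instead builds the cumulative table of team end-offsets once (itertools.accumulate), finds Player's first position with a single list.index, locates the containing team by binary search (bisect_right) into the table, and increments only that one sliced block.
import Mathlib
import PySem

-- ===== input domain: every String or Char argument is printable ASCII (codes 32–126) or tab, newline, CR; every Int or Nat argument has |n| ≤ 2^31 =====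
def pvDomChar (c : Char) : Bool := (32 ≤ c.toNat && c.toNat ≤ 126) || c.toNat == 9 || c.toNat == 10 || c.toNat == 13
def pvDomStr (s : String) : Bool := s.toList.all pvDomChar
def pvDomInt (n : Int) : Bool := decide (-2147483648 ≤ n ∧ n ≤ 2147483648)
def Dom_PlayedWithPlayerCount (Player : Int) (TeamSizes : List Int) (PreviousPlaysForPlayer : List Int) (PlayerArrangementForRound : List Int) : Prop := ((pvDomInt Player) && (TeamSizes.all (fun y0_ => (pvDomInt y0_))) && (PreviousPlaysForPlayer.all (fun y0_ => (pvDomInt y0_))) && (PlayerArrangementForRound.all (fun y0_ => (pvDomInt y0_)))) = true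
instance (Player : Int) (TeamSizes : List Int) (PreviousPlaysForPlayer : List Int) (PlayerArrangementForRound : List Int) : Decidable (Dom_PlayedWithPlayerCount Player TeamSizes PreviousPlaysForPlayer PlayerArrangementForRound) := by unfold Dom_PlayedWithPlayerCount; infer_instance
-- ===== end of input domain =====

-- B replaces A's linear scan over teams (slice + membership test per team) by a prefix-sum table of
-- team end-offsets and one bisection locating the team of Player's first position (objective: alternative).

-- B replaces A's linear scan over teams (slice + membership test per team) by a prefix-sum table of
-- team end-offsets and one bisection locating the team of Player's first position (objective: alternative).

-- ===== PORT A =====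
-- counts[t] = counts[t] + 1 with Python index semantics (negative index wraps; out of range = IndexError,
-- excluded by Pre_, where pyGet? returns none and the port leaves counts unchanged)
def pvBump (counts : List Int) (t : Int) : List Int :=
  match PySem.List.pyGet? counts t with
  | some v => PySem.List.pySetD counts t (v + 1)
  | none => counts

def pvALoop (Player : Int) (Arr : List Int) (sizes : List Int) (TeamStart : Int) (counts : List Int) : List Int :=
  match sizes with
  | [] => counts
  | s :: rest =>
    let Team := PySem.List.slice Arr (some TeamStart) (some (TeamStart + |s|))
    if Player ∈ Team then Team.foldl pvBump counts
    else pvALoop Player Arr rest (TeamStart + |s|) counts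

def PlayedWithPlayerCount (Player : Int) (TeamSizes : List Int) (PreviousPlaysForPlayer : List Int) (PlayerArrangementForRound : List Int) : List Int :=
  pvALoop Player PlayerArrangementForRound TeamSizes 0 PreviousPlaysForPlayer

-- ===== PORT B =====
-- itertools.accumulate(abs(s) for s in sizes)
def pvAccumAbs (sizes : List Int) (acc : Int) : List Int :=
  match sizes with
  | [] => []
  | s :: rest => (acc + |s|) :: pvAccumAbs rest (acc + |s|)

def PlayedWithPlayerCount_alt (Player : Int) (TeamSizes : List Int) (PreviousPlaysForPlayer : List Int) (PlayerArrangementForRound : List Int) : List Int :=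
  let counts := PreviousPlaysForPlayer
  let bounds := pvAccumAbs TeamSizes 0
  match bounds.getLast? with       -- assert bounds (failure = AssertionError, outside Pre_); last = bounds[-1]
  | none => counts
  | some last =>
    if Player ∈ PlayerArrangementForRound then
      match PySem.List.index? PlayerArrangementForRound Player with
      | none => counts
      | some p =>
        if (p : Int) ≥ last then counts
        else
          let i := PySem.List.bisectRight bounds (p : Int)
          let lo := if 0 < i then bounds.getD (i - 1) 0 else 0
          let hi := bounds.getD i 0
          (PySem.List.slice PlayerArrangementForRound (some lo) (some hi)).foldl pvBump counts
    else counts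

-- ===== PRECONDITION & SPEC =====
-- boundaries of the team block (by cumulative |size| offsets) containing position p, if any
def pvTeamRange (sizes : List Int) (S p : Int) : Option (Int × Int) :=
  match sizes with
  | [] => none
  | s :: rest => if p < S + |s| then some (S, S + |s|) else pvTeamRange rest (S + |s|) p

-- the members whose counters A increments: the team block containing Player's first position, if any
def pvCritSlice (Player : Int) (TeamSizes : List Int) (PlayerArrangementForRound : List Int) : List Int :=
  match PySem.List.index? PlayerArrangementForRound Player with
  | none => []
  | some p =>
    match pvTeamRange TeamSizes 0 (p : Int) with
    | none => []
    | some r => PySem.List.slice PlayerArrangementForRound (some r.1) (some r.2)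

-- Pre_ excludes exactly the inputs where Python A raises: AssertionError when TeamSizes is empty, and
-- IndexError when a member of Player's team block is not a valid (possibly negative) index into PreviousPlaysForPlayer.
def Pre_PlayedWithPlayerCount (Player : Int) (TeamSizes : List Int) (PreviousPlaysForPlayer : List Int) (PlayerArrangementForRound : List Int) : Prop :=
  TeamSizes ≠ [] ∧
  ∀ x ∈ pvCritSlice Player TeamSizes PlayerArrangementForRound,
    -(PreviousPlaysForPlayer.length : Int) ≤ x ∧ x < (PreviousPlaysForPlayer.length : Int)
instance (Player : Int) (TeamSizes : List Int) (PreviousPlaysForPlayer : List Int) (PlayerArrangementForRound : List Int) : Decidable (Pre_PlayedWithPlayerCount Player TeamSizes PreviousPlaysForPlayer PlayerArrangementForRound) := by unfold Pre_PlayedWithPlayerCount; infer_instance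
def pvWitness_PlayedWithPlayerCount : Int × List Int × List Int × List Int := (1, [2], [0, 0], [0, 1])

def Spec_PlayedWithPlayerCount (Player : Int) (TeamSizes : List Int) (PreviousPlaysForPlayer : List Int) (PlayerArrangementForRound : List Int) (out : List Int) : Prop := out = PlayedWithPlayerCount_alt Player TeamSizes PreviousPlaysForPlayer PlayerArrangementForRound
instance (Player : Int) (TeamSizes : List Int) (PreviousPlaysForPlayer : List Int) (PlayerArrangementForRound : List Int) (out : List Int) : Decidable (Spec_PlayedWithPlayerCount Player TeamSizes PreviousPlaysForPlayer PlayerArrangementForRound out) := by unfold Spec_PlayedWithPlayerCount; infer_instance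

-- ===== CLAIM (what is proved, stated in full; the proofs are below) =====
def Claim_equal_PlayedWithPlayerCount : Prop := ∀ (Player : Int) (TeamSizes : List Int) (PreviousPlaysForPlayer : List Int) (PlayerArrangementForRound : List Int), Dom_PlayedWithPlayerCount Player TeamSizes PreviousPlaysForPlayer PlayerArrangementForRound → Pre_PlayedWithPlayerCount Player TeamSizes PreviousPlaysForPlayer PlayerArrangementForRound → Spec_PlayedWithPlayerCount Player TeamSizes PreviousPlaysForPlayer PlayerArrangementForRound (PlayedWithPlayerCount Player TeamSizes PreviousPlaysForPlayer PlayerArrangementForRound)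

-- ===== LEMMAS AND PROOFS =====
def pvSumAbs (sizes : List Int) : Int := (sizes.map (fun s => |s|)).sum

-- membership of Player in a block slice, given p is Player's first position and the block starts at S ≤ p
lemma pv_mem_slice_iff (arr : List Int) (P : Int) (p : Nat)
    (hk : p < arr.length) (hv : arr[p] = P)
    (hmin : ∀ j (hj : j < arr.length), arr[j] = P → p ≤ j)
    (S E : Nat) (hS : S ≤ p) :
    (P ∈ PySem.List.slice arr (some (S : Int)) (some (E : Int))) ↔ p < E := by
  rw [PySem.List.slice_natCast]
  constructor
  · intro h
    obtain ⟨q, hq, hget⟩ := List.mem_iff_getElem.mp h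
    have hq' : q < E - S := lt_of_lt_of_le hq (by simp [List.length_take])
    have hqd : q < (arr.drop S).length := by
      have := List.length_take (l := arr.drop S) (i := E - S)
      omega
    rw [List.getElem_take, List.getElem_drop] at hget
    have := hmin (S + q) (by simp at hqd; omega) hget
    omega
  · intro hpE
    apply List.mem_iff_getElem.mpr
    refine ⟨p - S, ?_, ?_⟩
    · simp [List.length_take, List.length_drop]; omega
    · rw [List.getElem_take, List.getElem_drop]
      have : S + (p - S) = p := by omega
      simp [this, hv]

lemma pvALoop_of_not_mem (P : Int) (arr : List Int) (hP : P ∉ arr) :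
    ∀ (sizes : List Int) (S : Int) (counts : List Int), pvALoop P arr sizes S counts = counts := by
  intro sizes
  induction sizes with
  | nil => intro S counts; rfl
  | cons s rest ih =>
    intro S counts
    rw [pvALoop]
    rw [if_neg (fun h => hP (PySem.List.mem_of_mem_slice _ _ _ h))]
    exact ih _ _

lemma pvALoop_char (P : Int) (arr : List Int) (p : Nat)
    (hk : p < arr.length) (hv : arr[p] = P)
    (hmin : ∀ j (hj : j < arr.length), arr[j] = P → p ≤ j) :
    ∀ (sizes : List Int) (S : Nat) (counts : List Int), S ≤ p →
      pvALoop P arr sizes (S : Int) counts =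
        match pvTeamRange sizes (S : Int) (p : Int) with
        | none => counts
        | some r => (PySem.List.slice arr (some r.1) (some r.2)).foldl pvBump counts := by
  intro sizes
  induction sizes with
  | nil => intro S counts _; rfl
  | cons s rest ih =>
    intro S counts hS
    rw [pvALoop, pvTeamRange]
    have hcast : (S : Int) + |s| = ((S + s.natAbs : Nat) : Int) := by
      rw [Int.abs_eq_natAbs]; push_cast; ring
    rw [hcast]
    have hmem := pv_mem_slice_iff arr P p hk hv hmin S (S + s.natAbs) hS
    by_cases hlt : (p : Int) < ((S + s.natAbs : Nat) : Int)
    · rw [if_pos (hmem.mpr (by exact_mod_cast hlt)), if_pos hlt]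
    · rw [if_neg (fun h => hlt (by exact_mod_cast hmem.mp h)), if_neg hlt]
      have hge : ¬ (p < S + s.natAbs) := fun h => hlt (by exact_mod_cast h)
      exact ih (S + s.natAbs) counts (by omega)

lemma pvTeamRange_none (p : Int) :
    ∀ (sizes : List Int) (S : Int), S + pvSumAbs sizes ≤ p → pvTeamRange sizes S p = none := by
  intro sizes
  induction sizes with
  | nil => intro S _; rfl
  | cons s rest ih =>
    intro S h
    rw [pvTeamRange]
    have habs : 0 ≤ pvSumAbs rest := by
      apply List.sum_nonneg; intro x hx; simp at hx; obtain ⟨y,_,rfl⟩ := hx; exact abs_nonneg y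
    have hs : pvSumAbs (s :: rest) = |s| + pvSumAbs rest := by simp [pvSumAbs]
    rw [if_neg (by rw [hs] at h; omega)]
    exact ih _ (by rw [hs] at h; omega)

lemma pvAccumAbs_getLast (sizes : List Int) (hne : sizes ≠ []) :
    ∀ acc : Int, (pvAccumAbs sizes acc).getLast? = some (acc + pvSumAbs sizes) := by
  induction sizes with
  | nil => exact absurd rfl hne
  | cons s rest ih =>
    intro acc
    rw [pvAccumAbs]
    by_cases h : rest = []
    · subst h; simp [pvAccumAbs, pvSumAbs]
    · have hne2 : pvAccumAbs rest (acc + |s|) ≠ [] := by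
        cases rest with
        | nil => exact absurd rfl h
        | cons a b => simp [pvAccumAbs]
      rw [show ((acc + |s|) :: pvAccumAbs rest (acc + |s|)).getLast? = (pvAccumAbs rest (acc + |s|)).getLast? from by
        cases hpe : pvAccumAbs rest (acc + |s|) with
        | nil => exact absurd hpe hne2
        | cons b t => simp [List.getLast?_cons_cons]]
      rw [ih h]
      congr 1
      simp [pvSumAbs]; ring

lemma pvAccumAbs_ge (sizes : List Int) :
    ∀ acc : Int, ∀ x ∈ pvAccumAbs sizes acc, acc ≤ x := by
  induction sizes with
  | nil => intro acc x hx; simp [pvAccumAbs] at hx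
  | cons s rest ih =>
    intro acc x hx
    rw [pvAccumAbs] at hx
    rcases List.mem_cons.mp hx with h | h
    · subst h; have := abs_nonneg s; omega
    · have := ih (acc + |s|) x h
      have := abs_nonneg s; omega

lemma pvAccumAbs_sorted (sizes : List Int) :
    ∀ acc : Int, (pvAccumAbs sizes acc).Pairwise (· ≤ ·) := by
  induction sizes with
  | nil => intro acc; simp [pvAccumAbs]
  | cons s rest ih =>
    intro acc
    rw [pvAccumAbs]
    exact List.pairwise_cons.mpr ⟨fun x hx => pvAccumAbs_ge rest _ x hx, ih _⟩

lemma pvTeamRange_of_bounds (p : Int) :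
    ∀ (sizes : List Int) (S : Int) (k : Nat),
      (∀ j (hj : j < (pvAccumAbs sizes S).length), j < k → (pvAccumAbs sizes S)[j] ≤ p) →
      (hk : k < (pvAccumAbs sizes S).length) →
      p < (pvAccumAbs sizes S)[k] →
      pvTeamRange sizes S p =
        some (if 0 < k then (pvAccumAbs sizes S).getD (k - 1) 0 else S, (pvAccumAbs sizes S).getD k 0) := by
  intro sizes
  induction sizes with
  | nil => intro S k _ hk _; simp [pvAccumAbs] at hk
  | cons s rest ih =>
    intro S k hlow hk hhigh
    rw [pvTeamRange]
    match k with
    | 0 =>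
      rw [if_pos (by simpa [pvAccumAbs] using hhigh)]
      simp [pvAccumAbs]
    | Nat.succ k' =>
      have h0 : (S + |s|) ≤ p := by
        have := hlow 0 (by simp [pvAccumAbs]) (Nat.succ_pos k')
        simpa [pvAccumAbs] using this
      rw [if_neg (by omega)]
      have hk' : k' < (pvAccumAbs rest (S + |s|)).length := by
        simpa [pvAccumAbs] using hk
      rw [ih (S + |s|) k'
        (fun j hj hjk => by
          have := hlow (j+1) (by simp [pvAccumAbs]; omega) (by omega)
          simpa [pvAccumAbs] using this)
        hk'
        (by simpa [pvAccumAbs] using hhigh)]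
      congr 1
      match k' with
      | 0 => simp [pvAccumAbs]
      | Nat.succ k'' => simp [pvAccumAbs]

-- the two ports agree on every input (the Pre_ hypothesis of the claim is not needed for the equality itself;
-- it marks the inputs on which Python A returns without raising, where the ports are faithful)
lemma pv_ports_eq (P : Int) (sizes : List Int) (prev : List Int) (arr : List Int) :
    PlayedWithPlayerCount P sizes prev arr = PlayedWithPlayerCount_alt P sizes prev arr := by
    rw [PlayedWithPlayerCount]
    by_cases hsz : sizes = []
    · subst hsz
      simp [pvALoop, PlayedWithPlayerCount_alt, pvAccumAbs]
    · have hlast := pvAccumAbs_getLast sizes hsz 0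
      rw [PlayedWithPlayerCount_alt]
      simp only [hlast]
      by_cases hmem : P ∈ arr
      · rw [if_pos hmem]
        cases hidx : PySem.List.index? arr P with
        | none => exact absurd (PySem.List.index?_eq_none_iff arr P |>.mp hidx) (by simpa using hmem)
        | some p =>
          obtain ⟨hk, hv, hprev⟩ := PySem.List.getElem_of_index?_eq_some hidx
          have hmin : ∀ j (hj : j < arr.length), arr[j] = P → p ≤ j := by
            intro j hj hjv
            by_contra hc
            exact hprev j (by omega) hjv
          have hchar := pvALoop_char P arr p hk hv hmin sizes 0 prev (Nat.zero_le p)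
          rw [show ((0 : Nat) : Int) = (0 : Int) from rfl] at hchar
          rw [hchar]
          dsimp only
          by_cases hge : (p : Int) ≥ 0 + pvSumAbs sizes
          · rw [if_pos hge, pvTeamRange_none p sizes 0 (by omega)]
          · rw [if_neg hge]
            have hsorted := pvAccumAbs_sorted sizes 0
            obtain ⟨hkle, hlow, hhigh⟩ := PySem.List.bisectRight_spec (pvAccumAbs sizes 0) (p : Int) hsorted
            have hbne : pvAccumAbs sizes 0 ≠ [] := by
              intro h; rw [h] at hlast; simp at hlast
            have hlen : 0 < (pvAccumAbs sizes 0).length := List.length_pos_iff.mpr hbne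
            have hlastel : (pvAccumAbs sizes 0)[(pvAccumAbs sizes 0).length - 1] = 0 + pvSumAbs sizes := by
              have : (pvAccumAbs sizes 0).getLast? = (pvAccumAbs sizes 0)[(pvAccumAbs sizes 0).length - 1]? := List.getLast?_eq_getElem?
              rw [hlast] at this
              have h2 := (List.getElem?_eq_some_iff).mp this.symm
              obtain ⟨hh, he⟩ := h2
              exact he
            have hklen : PySem.List.bisectRight (pvAccumAbs sizes 0) (p : Int) < (pvAccumAbs sizes 0).length := by
              rcases Nat.lt_or_ge (PySem.List.bisectRight (pvAccumAbs sizes 0) (p : Int)) (pvAccumAbs sizes 0).length with h | h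
              · exact h
              · exfalso
                have := hlow ((pvAccumAbs sizes 0).length - 1) (by omega) (by omega)
                rw [hlastel] at this
                omega
            rw [pvTeamRange_of_bounds p sizes 0 (PySem.List.bisectRight (pvAccumAbs sizes 0) (p : Int))
              (fun j hj hjk => hlow j hj hjk) hklen (hhigh _ hklen (le_refl _))]
      · rw [if_neg hmem]
        exact pvALoop_of_not_mem P arr hmem sizes 0 prev

-- ===== VERDICT (by name: the statement is the Claim_ definition above) =====
theorem PlayedWithPlayerCount_spec : Claim_equal_PlayedWithPlayerCount := by
  intro Player TeamSizes PreviousPlaysForPlayer PlayerArrangementForRound _ _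
  unfold Spec_PlayedWithPlayerCount
  exact pv_ports_eq Player TeamSizes PreviousPlaysForPlayer PlayerArrangementForRound
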